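-- pv_equiv track=rewrite | github.com/IgSit/ASD | różne/cut cloth.py | another_cut
-- ===== SOURCE A (Python) =====
-- def another_cut(matrix, x, y):
--     func = [[0 for _ in range(y + 1)] for _ in range(x + 1)]
--     for a in range(1, x + 1):
--         for b in range(1, y + 1):
--             try:
--                 func[a][b] = matrix[a][b]
--             except IndexError:
--                 continue
--
--             # check horizontal lines
--             for h in range(1, a // 2 + 1):
--                 func[a][b] = max(func[a][b], func[a - h][b] + func[h][b])
--
--             # check vertical lines
--             for w in range(1, b // 2 + 1):
--                 func[a][b] = max(func[a][b], func[a][b - w] + func[a][w])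
--
--     return func[x][y]
-- ===== SOURCE B (Python) =====
-- def another_cut(matrix, x, y):
--     memo = {}
--
--     def solve(a, b):
--         if a == 0 or b == 0:
--             return 0
--         if (a, b) in memo:
--             return memo[(a, b)]
--         try:
--             best = matrix[a][b]
--         except IndexError:
--             memo[(a, b)] = 0
--             return 0
--         for h in range(1, a // 2 + 1):
--             best = max(best, solve(a - h, b) + solve(h, b))
--         for w in range(1, b // 2 + 1):
--             best = max(best, solve(a, b - w) + solve(a, w))
--         memo[(a, b)] = best
--         return best
--
--     return solve(x, y)
-- ===== Notes on version B (the rewrite author's own statement) =====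
-- stated objective: faster
-- what changed: Replaces the bottom-up (x+1)x(y+1) DP table filled by nested loops with top-down recursive memoization (a dict keyed on (a,b)) that computes only the cells actually demanded from (x,y) and returns immediately on out-of-matrix cells, where A still iterates the whole table; Pre_ excludes x<0 or y<0, where A raises IndexError on its own table.
import Mathlib
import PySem

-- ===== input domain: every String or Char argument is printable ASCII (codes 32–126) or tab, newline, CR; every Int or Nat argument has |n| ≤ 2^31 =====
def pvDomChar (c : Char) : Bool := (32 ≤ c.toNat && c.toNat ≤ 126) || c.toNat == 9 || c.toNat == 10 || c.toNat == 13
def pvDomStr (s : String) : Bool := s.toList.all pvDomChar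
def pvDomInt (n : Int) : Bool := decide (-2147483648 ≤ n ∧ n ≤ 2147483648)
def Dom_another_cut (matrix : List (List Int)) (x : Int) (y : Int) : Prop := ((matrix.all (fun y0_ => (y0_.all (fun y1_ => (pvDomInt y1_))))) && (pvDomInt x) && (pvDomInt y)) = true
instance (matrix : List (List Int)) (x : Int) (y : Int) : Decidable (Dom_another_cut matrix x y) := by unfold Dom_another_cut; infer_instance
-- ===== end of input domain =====

-- B replaces A's bottom-up DP table with top-down memoized recursion (dict keyed on (a,b)); alternative decomposition, same results.


-- ===== PORT A =====
-- func[i][j] read/write helpers; exact for the in-range nonnegative indices A uses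
def acGet2 (f : List (List Int)) (i j : Int) : Int :=
  PySem.List.pyGetD (PySem.List.pyGetD f i []) j 0

def acSet2 (f : List (List Int)) (i j : Int) (v : Int) : List (List Int) :=
  PySem.List.pySetD f i (PySem.List.pySetD (PySem.List.pyGetD f i []) j v)

-- literal port of A: build the (x+1)×(y+1) zero table, fill it with the three nested loops, return func[x][y]
def another_cut (matrix : List (List Int)) (x : Int) (y : Int) : Int :=
  let func0 : List (List Int) :=
    (PySem.List.pyRange 0 (x + 1) 1).map (fun _ => (PySem.List.pyRange 0 (y + 1) 1).map (fun _ => (0 : Int)))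
  let func := (PySem.List.pyRange 1 (x + 1) 1).foldl (fun func a =>
    (PySem.List.pyRange 1 (y + 1) 1).foldl (fun func b =>
      match (PySem.List.pyGet? matrix a).bind (fun r => PySem.List.pyGet? r b) with
      | none => func            -- except IndexError: continue
      | some v =>
        let func := acSet2 func a b v
        let func := (PySem.List.pyRange 1 (PySem.Int.floordiv a 2 + 1) 1).foldl
          (fun f h => acSet2 f a b (max (acGet2 f a b) (acGet2 f (a - h) b + acGet2 f h b))) func
        (PySem.List.pyRange 1 (PySem.Int.floordiv b 2 + 1) 1).foldl
          (fun f w => acSet2 f a b (max (acGet2 f a b) (acGet2 f a (b - w) + acGet2 f a w))) func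
      ) func) func0
  acGet2 func x y

-- ===== PORT B =====
-- literal port of B's `solve` with the memo dict threaded through; fuel only makes the recursion structural
def acSolve (matrix : List (List Int)) : Nat → PySem.Dict (Int × Int) Int → Int → Int → Int × PySem.Dict (Int × Int) Int
  | 0, memo, _, _ => (0, memo)  -- never reached with the fuel another_cut_alt supplies
  | fuel + 1, memo, a, b =>
    if a = 0 ∨ b = 0 then (0, memo)
    else
      match memo.get? (a, b) with
      | some v => (v, memo)
      | none =>
        match (PySem.List.pyGet? matrix a).bind (fun r => PySem.List.pyGet? r b) with
        | none => (0, memo.insert (a, b) 0)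
        | some v0 =>
          let s1 := (PySem.List.pyRange 1 (PySem.Int.floordiv a 2 + 1) 1).foldl
            (fun (p : Int × PySem.Dict (Int × Int) Int) h =>
              let r1 := acSolve matrix fuel p.2 (a - h) b
              let r2 := acSolve matrix fuel r1.2 h b
              (max p.1 (r1.1 + r2.1), r2.2)) (v0, memo)
          let s2 := (PySem.List.pyRange 1 (PySem.Int.floordiv b 2 + 1) 1).foldl
            (fun (p : Int × PySem.Dict (Int × Int) Int) w =>
              let r1 := acSolve matrix fuel p.2 a (b - w)
              let r2 := acSolve matrix fuel r1.2 a w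
              (max p.1 (r1.1 + r2.1), r2.2)) s1
          (s2.1, s2.2.insert (a, b) s2.1)

def another_cut_alt (matrix : List (List Int)) (x : Int) (y : Int) : Int :=
  (acSolve matrix ((x + y).toNat + 1) PySem.Dict.empty x y).1

-- ===== PRECONDITION & SPEC =====
-- Pre_ excludes exactly x < 0 or y < 0: there A's table is empty (or has empty rows) and func[x][y] raises IndexError.
def Pre_another_cut (matrix : List (List Int)) (x : Int) (y : Int) : Prop := 0 ≤ x ∧ 0 ≤ y
instance (matrix : List (List Int)) (x : Int) (y : Int) : Decidable (Pre_another_cut matrix x y) := by unfold Pre_another_cut; infer_instance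

def pvWitness_another_cut : List (List Int) × Int × Int := ([[0, 0], [0, 3]], 1, 1)

def Spec_another_cut (matrix : List (List Int)) (x : Int) (y : Int) (out : Int) : Prop := out = another_cut_alt matrix x y
instance (matrix : List (List Int)) (x : Int) (y : Int) (out : Int) : Decidable (Spec_another_cut matrix x y out) := by unfold Spec_another_cut; infer_instance

-- ===== CLAIM (what is proved, stated in full; the proofs are below) =====
def Claim_equal_another_cut : Prop := ∀ (matrix : List (List Int)) (x : Int) (y : Int), Dom_another_cut matrix x y → Pre_another_cut matrix x y → Spec_another_cut matrix x y (another_cut matrix x y)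

-- ===== LEMMAS AND PROOFS =====

-- the common recurrence both ports compute (proof-side only; fuel-indexed)
def acF (matrix : List (List Int)) : Nat → Int → Int → Int
  | 0, _, _ => 0
  | fuel + 1, a, b =>
    if a = 0 ∨ b = 0 then 0
    else
      match (PySem.List.pyGet? matrix a).bind (fun r => PySem.List.pyGet? r b) with
      | none => 0
      | some v0 =>
        (PySem.List.pyRange 1 (PySem.Int.floordiv b 2 + 1) 1).foldl
          (fun acc w => max acc (acF matrix fuel a (b - w) + acF matrix fuel a w))
          ((PySem.List.pyRange 1 (PySem.Int.floordiv a 2 + 1) 1).foldl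
            (fun acc h => max acc (acF matrix fuel (a - h) b + acF matrix fuel h b)) v0)

def acFF (matrix : List (List Int)) (a b : Int) : Int := acF matrix (a.toNat + b.toNat + 1) a b

-- membership bounds for the two ranges
theorem acMemH {a h : Int} (hh : h ∈ PySem.List.pyRange 1 (PySem.Int.floordiv a 2 + 1) 1) :
    1 ≤ h ∧ 2 * h ≤ a := by
  rw [PySem.List.mem_pyRange_one] at hh
  rw [PySem.Int.floordiv_eq_ediv_of_pos (by omega)] at hh
  omega

theorem acF_fuel (m : List (List Int)) :
    ∀ (f1 : Nat) (f2 : Nat) (a b : Int), 0 ≤ a → 0 ≤ b → a.toNat + b.toNat ≤ f1 → a.toNat + b.toNat ≤ f2 →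
      acF m f1 a b = acF m f2 a b := by
  intro f1
  induction f1 with
  | zero =>
    intro f2 a b ha hb h1 h2
    have ha0 : a = 0 := by omega
    cases f2 with
    | zero => rfl
    | succ f2 => simp [acF, ha0]
  | succ f1 ih =>
    intro f2 a b ha hb h1 h2
    cases f2 with
    | zero =>
      have ha0 : a = 0 := by omega
      simp [acF, ha0]
    | succ f2 =>
      by_cases hz : a = 0 ∨ b = 0
      · simp only [acF, if_pos hz]
      · simp only [acF, if_neg hz]
        cases hm : (PySem.List.pyGet? m a).bind (fun r => PySem.List.pyGet? r b) with
        | none => rfl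
        | some v0 =>
          dsimp only
          have hcon1 : ∀ (acc : Int), ∀ h ∈ PySem.List.pyRange 1 (PySem.Int.floordiv a 2 + 1) 1,
              (fun (acc : Int) (h : Int) => max acc (acF m f1 (a - h) b + acF m f1 h b)) acc h
                = (fun (acc : Int) (h : Int) => max acc (acF m f2 (a - h) b + acF m f2 h b)) acc h := by
            intro acc h hh
            obtain ⟨hh1, hh2⟩ := acMemH hh
            dsimp only
            rw [ih f2 (a - h) b (by omega) hb (by omega) (by omega),
                ih f2 h b (by omega) hb (by omega) (by omega)]
          have hcon2 : ∀ (acc : Int), ∀ w ∈ PySem.List.pyRange 1 (PySem.Int.floordiv b 2 + 1) 1,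
              (fun (acc : Int) (w : Int) => max acc (acF m f1 a (b - w) + acF m f1 a w)) acc w
                = (fun (acc : Int) (w : Int) => max acc (acF m f2 a (b - w) + acF m f2 a w)) acc w := by
            intro acc w hw
            obtain ⟨hw1, hw2⟩ := acMemH hw
            dsimp only
            rw [ih f2 a (b - w) ha (by omega) (by omega) (by omega),
                ih f2 a w ha (by omega) (by omega) (by omega)]
          rw [PySem.List.foldl_congr_mem _ _ _ _ hcon1, PySem.List.foldl_congr_mem _ _ _ _ hcon2]

theorem acFF_eq_acF (m : List (List Int)) (f : Nat) (a b : Int) (ha : 0 ≤ a) (hb : 0 ≤ b)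
    (hf : a.toNat + b.toNat ≤ f) : acF m f a b = acFF m a b :=
  acF_fuel m f (a.toNat + b.toNat + 1) a b ha hb hf (by omega)

theorem acFF_zero_left (m : List (List Int)) (b : Int) : acFF m 0 b = 0 := by
  simp [acFF, acF]

theorem acFF_zero_right (m : List (List Int)) (a : Int) : acFF m a 0 = 0 := by
  have : acF m (a.toNat + 1) a 0 = 0 := by simp [acF]
  simpa [acFF] using this

-- one-step unfolding of acFF in terms of acFF itself
theorem acFF_unfold (m : List (List Int)) (a b : Int) (ha : 0 ≤ a) (hb : 0 ≤ b) :
    acFF m a b =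
      if a = 0 ∨ b = 0 then 0
      else
        match (PySem.List.pyGet? m a).bind (fun r => PySem.List.pyGet? r b) with
        | none => 0
        | some v0 =>
          (PySem.List.pyRange 1 (PySem.Int.floordiv b 2 + 1) 1).foldl
            (fun acc w => max acc (acFF m a (b - w) + acFF m a w))
            ((PySem.List.pyRange 1 (PySem.Int.floordiv a 2 + 1) 1).foldl
              (fun acc h => max acc (acFF m (a - h) b + acFF m h b)) v0) := by
  conv_lhs => rw [acFF]
  rw [show a.toNat + b.toNat + 1 = (a.toNat + b.toNat) + 1 from rfl]
  simp only [acF]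
  by_cases hz : a = 0 ∨ b = 0
  · simp [hz]
  · simp only [if_neg hz]
    cases hm : (PySem.List.pyGet? m a).bind (fun r => PySem.List.pyGet? r b) with
    | none => rfl
    | some v0 =>
      dsimp only
      have hcon1 : ∀ (acc : Int), ∀ h ∈ PySem.List.pyRange 1 (PySem.Int.floordiv a 2 + 1) 1,
          (fun (acc : Int) (h : Int) => max acc (acF m (a.toNat + b.toNat) (a - h) b + acF m (a.toNat + b.toNat) h b)) acc h
            = (fun (acc : Int) (h : Int) => max acc (acFF m (a - h) b + acFF m h b)) acc h := by
        intro acc h hh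
        obtain ⟨hh1, hh2⟩ := acMemH hh
        dsimp only
        rw [acFF_eq_acF m _ (a - h) b (by omega) hb (by omega),
            acFF_eq_acF m _ h b (by omega) hb (by omega)]
      have hcon2 : ∀ (acc : Int), ∀ w ∈ PySem.List.pyRange 1 (PySem.Int.floordiv b 2 + 1) 1,
          (fun (acc : Int) (w : Int) => max acc (acF m (a.toNat + b.toNat) a (b - w) + acF m (a.toNat + b.toNat) a w)) acc w
            = (fun (acc : Int) (w : Int) => max acc (acFF m a (b - w) + acFF m a w)) acc w := by
        intro acc w hw
        obtain ⟨hw1, hw2⟩ := acMemH hw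
        dsimp only
        rw [acFF_eq_acF m _ a (b - w) ha (by omega) (by omega),
            acFF_eq_acF m _ a w ha (by omega) (by omega)]
      rw [PySem.List.foldl_congr_mem _ _ _ _ hcon1, PySem.List.foldl_congr_mem _ _ _ _ hcon2]


-- the memo invariant: every stored value is the recurrence value of its (nonnegative) key
def acInv (m : List (List Int)) (memo : PySem.Dict (Int × Int) Int) : Prop :=
  ∀ (p : Int × Int) (v : Int), memo.get? p = some v → 0 ≤ p.1 ∧ 0 ≤ p.2 ∧ v = acFF m p.1 p.2

theorem acSolve_ok (m : List (List Int)) :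
    ∀ (fuel : Nat) (memo : PySem.Dict (Int × Int) Int) (a b : Int), 0 ≤ a → 0 ≤ b →
      a.toNat + b.toNat ≤ fuel → acInv m memo →
      (acSolve m fuel memo a b).1 = acFF m a b ∧ acInv m (acSolve m fuel memo a b).2 := by
  intro fuel
  induction fuel with
  | zero =>
    intro memo a b ha hb hf hinv
    have ha0 : a = 0 := by omega
    subst ha0
    exact ⟨(acFF_zero_left m b).symm, hinv⟩
  | succ fuel ih =>
    intro memo a b ha hb hf hinv
    by_cases hz : a = 0 ∨ b = 0
    · refine ⟨?_, by simpa [acSolve, if_pos hz] using hinv⟩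
      simp only [acSolve, if_pos hz]
      rcases hz with hz | hz <;> subst hz
      · exact (acFF_zero_left m b).symm
      · exact (acFF_zero_right m a).symm
    · simp only [acSolve, if_neg hz]
      cases hmemo : memo.get? (a, b) with
      | some v =>
        exact ⟨(hinv (a, b) v hmemo).2.2, by simpa [hmemo] using hinv⟩
      | none =>
        cases hm : (PySem.List.pyGet? m a).bind (fun r => PySem.List.pyGet? r b) with
        | none =>
          constructor
          · rw [acFF_unfold m a b ha hb, if_neg hz, hm]
          · intro p v hp
            rw [PySem.Dict.get?_insert] at hp
            split at hp
            · rename_i hpe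
              subst hpe
              injection hp with hv
              refine ⟨ha, hb, ?_⟩
              rw [acFF_unfold m a b ha hb, if_neg hz, hm]
              exact hv.symm
            · exact hinv p v hp
        | some v0 =>
          dsimp only
          -- h-loop fold: value is the pure fold, memo stays coherent
          have hfold : ∀ (l : List Int), (∀ h ∈ l, 1 ≤ h ∧ 2 * h ≤ a) →
              ∀ (acc : Int) (d : PySem.Dict (Int × Int) Int), acInv m d →
              (l.foldl (fun (p : Int × PySem.Dict (Int × Int) Int) h =>
                  (max p.1 ((acSolve m fuel p.2 (a - h) b).1 + (acSolve m fuel (acSolve m fuel p.2 (a - h) b).2 h b).1),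
                    (acSolve m fuel (acSolve m fuel p.2 (a - h) b).2 h b).2)) (acc, d)).1
                = l.foldl (fun acc h => max acc (acFF m (a - h) b + acFF m h b)) acc
              ∧ acInv m (l.foldl (fun (p : Int × PySem.Dict (Int × Int) Int) h =>
                  (max p.1 ((acSolve m fuel p.2 (a - h) b).1 + (acSolve m fuel (acSolve m fuel p.2 (a - h) b).2 h b).1),
                    (acSolve m fuel (acSolve m fuel p.2 (a - h) b).2 h b).2)) (acc, d)).2 := by
            intro l
            induction l with
            | nil => intro _ acc d hd; exact ⟨rfl, hd⟩
            | cons h t iht =>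
              intro hmem acc d hd
              obtain ⟨hh1, hh2⟩ := hmem h (List.mem_cons_self ..)
              have c1 := ih d (a - h) b (by omega) hb (by omega) hd
              have c2 := ih (acSolve m fuel d (a - h) b).2 h b (by omega) hb (by omega) c1.2
              simp only [List.foldl_cons]
              rw [c1.1, c2.1]
              exact iht (fun x hx => hmem x (List.mem_cons_of_mem _ hx))
                (max acc (acFF m (a - h) b + acFF m h b))
                (acSolve m fuel (acSolve m fuel d (a - h) b).2 h b).2 c2.2
          have wfold : ∀ (l : List Int), (∀ w ∈ l, 1 ≤ w ∧ 2 * w ≤ b) →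
              ∀ (acc : Int) (d : PySem.Dict (Int × Int) Int), acInv m d →
              (l.foldl (fun (p : Int × PySem.Dict (Int × Int) Int) w =>
                  (max p.1 ((acSolve m fuel p.2 a (b - w)).1 + (acSolve m fuel (acSolve m fuel p.2 a (b - w)).2 a w).1),
                    (acSolve m fuel (acSolve m fuel p.2 a (b - w)).2 a w).2)) (acc, d)).1
                = l.foldl (fun acc w => max acc (acFF m a (b - w) + acFF m a w)) acc
              ∧ acInv m (l.foldl (fun (p : Int × PySem.Dict (Int × Int) Int) w =>
                  (max p.1 ((acSolve m fuel p.2 a (b - w)).1 + (acSolve m fuel (acSolve m fuel p.2 a (b - w)).2 a w).1),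
                    (acSolve m fuel (acSolve m fuel p.2 a (b - w)).2 a w).2)) (acc, d)).2 := by
            intro l
            induction l with
            | nil => intro _ acc d hd; exact ⟨rfl, hd⟩
            | cons w t iwt =>
              intro hmem acc d hd
              obtain ⟨hw1, hw2⟩ := hmem w (List.mem_cons_self ..)
              have c1 := ih d a (b - w) ha (by omega) (by omega) hd
              have c2 := ih (acSolve m fuel d a (b - w)).2 a w ha (by omega) (by omega) c1.2
              simp only [List.foldl_cons]
              rw [c1.1, c2.1]
              exact iwt (fun x hx => hmem x (List.mem_cons_of_mem _ hx))
                (max acc (acFF m a (b - w) + acFF m a w))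
                (acSolve m fuel (acSolve m fuel d a (b - w)).2 a w).2 c2.2
          obtain ⟨h1v, h1i⟩ := hfold (PySem.List.pyRange 1 (PySem.Int.floordiv a 2 + 1) 1)
            (fun h hh => acMemH hh) v0 memo hinv
          have h2 := wfold (PySem.List.pyRange 1 (PySem.Int.floordiv b 2 + 1) 1)
            (fun w hw => acMemH hw)
            ((PySem.List.pyRange 1 (PySem.Int.floordiv a 2 + 1) 1).foldl
              (fun (p : Int × PySem.Dict (Int × Int) Int) h =>
                  (max p.1 ((acSolve m fuel p.2 (a - h) b).1 + (acSolve m fuel (acSolve m fuel p.2 (a - h) b).2 h b).1),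
                    (acSolve m fuel (acSolve m fuel p.2 (a - h) b).2 h b).2)) (v0, memo)).1
            ((PySem.List.pyRange 1 (PySem.Int.floordiv a 2 + 1) 1).foldl
              (fun (p : Int × PySem.Dict (Int × Int) Int) h =>
                  (max p.1 ((acSolve m fuel p.2 (a - h) b).1 + (acSolve m fuel (acSolve m fuel p.2 (a - h) b).2 h b).1),
                    (acSolve m fuel (acSolve m fuel p.2 (a - h) b).2 h b).2)) (v0, memo)).2
            h1i
          rw [Prod.mk.eta] at h2
          obtain ⟨h2v, h2i⟩ := h2
          have hval : ((PySem.List.pyRange 1 (PySem.Int.floordiv b 2 + 1) 1).foldl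
              (fun (p : Int × PySem.Dict (Int × Int) Int) w =>
                  (max p.1 ((acSolve m fuel p.2 a (b - w)).1 + (acSolve m fuel (acSolve m fuel p.2 a (b - w)).2 a w).1),
                    (acSolve m fuel (acSolve m fuel p.2 a (b - w)).2 a w).2))
              ((PySem.List.pyRange 1 (PySem.Int.floordiv a 2 + 1) 1).foldl
                (fun (p : Int × PySem.Dict (Int × Int) Int) h =>
                  (max p.1 ((acSolve m fuel p.2 (a - h) b).1 + (acSolve m fuel (acSolve m fuel p.2 (a - h) b).2 h b).1),
                    (acSolve m fuel (acSolve m fuel p.2 (a - h) b).2 h b).2)) (v0, memo))).1 = acFF m a b := by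
            rw [acFF_unfold m a b ha hb, if_neg hz, hm, h2v, h1v]
          refine ⟨hval, ?_⟩
          intro p v hp
          rw [PySem.Dict.get?_insert] at hp
          split at hp
          · rename_i hpe
            subst hpe
            injection hp with hv
            exact ⟨ha, hb, by rw [← hv]; exact hval⟩
          · exact h2i p v hp

-- B's entry point computes the recurrence
theorem alt_eq_acFF (m : List (List Int)) (x y : Int) (hx : 0 ≤ x) (hy : 0 ≤ y) :
    another_cut_alt m x y = acFF m x y := by
  have h := acSolve_ok m ((x + y).toNat + 1) PySem.Dict.empty x y hx hy (by omega)
    (fun p v hp => by simp [PySem.Dict.get?_empty] at hp)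
  exact h.1


-- ===== A-side: the table as a function of its indices =====
def acTab (mr nc : Nat) (g : Nat → Nat → Int) : List (List Int) :=
  (List.range mr).map (fun i => (List.range nc).map (g i))

theorem acTab_get {mr nc : Nat} (g : Nat → Nat → Int) {i j : Int}
    (hi0 : 0 ≤ i) (hi : i.toNat < mr) (hj0 : 0 ≤ j) (hj : j.toNat < nc) :
    acGet2 (acTab mr nc g) i j = g i.toNat j.toNat := by
  unfold acGet2 acTab
  rw [PySem.List.pyGetD_eq_getElem _ _ hi0 (by simp; omega)]
  simp only [List.getElem_map, List.getElem_range]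
  rw [PySem.List.pyGetD_eq_getElem _ _ hj0 (by simp; omega)]
  simp

theorem acTab_set {mr nc : Nat} (g : Nat → Nat → Int) {i j : Int} (v : Int)
    (hi0 : 0 ≤ i) (hi : i.toNat < mr) (hj0 : 0 ≤ j) (hj : j.toNat < nc) :
    acSet2 (acTab mr nc g) i j v
      = acTab mr nc (fun p q => if p = i.toNat ∧ q = j.toNat then v else g p q) := by
  unfold acSet2 acTab
  rw [PySem.List.pyGetD_eq_getElem _ _ hi0 (by simp; omega)]
  simp only [List.getElem_map, List.getElem_range]
  rw [PySem.List.pySetD_of_nonneg _ _ hj0, PySem.List.pySetD_of_nonneg _ _ hi0]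
  apply List.ext_getElem
  · simp
  · intro p hp hp'
    simp only [List.getElem_set, List.getElem_map, List.getElem_range]
    by_cases hpi : p = i.toNat
    · subst hpi
      simp only [if_pos rfl]
      apply List.ext_getElem
      · simp
      · intro q hq hq'
        simp only [List.getElem_set, List.getElem_map, List.getElem_range]
        by_cases hqj : q = j.toNat
        · subst hqj; simp
        · simp [hqj, Ne.symm hqj]
    · have : ¬ i.toNat = p := fun h => hpi h.symm
      simp only [if_neg this]
      apply List.ext_getElem
      · simp
      · intro q hq hq'
        simp only [List.getElem_map, List.getElem_range]
        simp [hpi]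

theorem acTab_congr {mr nc : Nat} {g g' : Nat → Nat → Int}
    (h : ∀ p, p < mr → ∀ q, q < nc → g p q = g' p q) : acTab mr nc g = acTab mr nc g' := by
  unfold acTab
  apply List.map_congr_left
  intro p hp
  apply List.map_congr_left
  intro q hq
  exact h p (List.mem_range.mp hp) q (List.mem_range.mp hq)

-- the h-loop over the table only rewrites cell (a,b), folding a pure running max of the supplied read-back values
theorem acTab_hfold {mr nc : Nat} {a b : Int} (ha : 1 ≤ a) (hb : 1 ≤ b)
    (hma : a.toNat < mr) (hnb : b.toNat < nc) :
    ∀ (l : List Int), (∀ h ∈ l, 1 ≤ h ∧ 2 * h ≤ a) → ∀ (g : Nat → Nat → Int) (r1 r2 : Int → Int) (s : Int),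
      g a.toNat b.toNat = s →
      (∀ h ∈ l, g (a - h).toNat b.toNat = r1 h) →
      (∀ h ∈ l, g h.toNat b.toNat = r2 h) →
      l.foldl (fun f h => acSet2 f a b (max (acGet2 f a b) (acGet2 f (a - h) b + acGet2 f h b)))
        (acTab mr nc g)
      = acTab mr nc (fun p q => if p = a.toNat ∧ q = b.toNat
          then l.foldl (fun acc h => max acc (r1 h + r2 h)) s
          else g p q) := by
  intro l
  induction l with
  | nil =>
    intro _ g r1 r2 s hs _ _
    simp only [List.foldl_nil]
    apply acTab_congr
    intro p hp q hq
    split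
    · rename_i hpq; rw [hpq.1, hpq.2, hs]
    · rfl
  | cons h t iht =>
    intro hmem g r1 r2 s hs hr1 hr2
    obtain ⟨hh1, hh2⟩ := hmem h (List.mem_cons_self ..)
    simp only [List.foldl_cons]
    rw [acTab_get g (by omega) hma (by omega) hnb,
        acTab_get g (by omega) (by omega) (by omega) hnb,
        acTab_get g (by omega) (by omega) (by omega) hnb,
        acTab_set g _ (by omega) hma (by omega) hnb,
        iht (fun x hx => hmem x (List.mem_cons_of_mem _ hx)) _ r1 r2
          (max s (r1 h + r2 h))
          (by
            rw [if_pos ⟨rfl, rfl⟩, hs, hr1 h (List.mem_cons_self ..), hr2 h (List.mem_cons_self ..)])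
          (by
            intro x hx
            obtain ⟨hx1, hx2⟩ := hmem x (List.mem_cons_of_mem _ hx)
            rw [if_neg (by intro hc; omega)]
            exact hr1 x (List.mem_cons_of_mem _ hx))
          (by
            intro x hx
            obtain ⟨hx1, hx2⟩ := hmem x (List.mem_cons_of_mem _ hx)
            rw [if_neg (by intro hc; omega)]
            exact hr2 x (List.mem_cons_of_mem _ hx))]
    apply acTab_congr
    intro p hp q hq
    by_cases hpq : p = a.toNat ∧ q = b.toNat
    · rw [if_pos hpq, if_pos hpq]
    · rw [if_neg hpq, if_neg hpq, if_neg hpq]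

-- the w-loop likewise
theorem acTab_wfold {mr nc : Nat} {a b : Int} (ha : 1 ≤ a) (hb : 1 ≤ b)
    (hma : a.toNat < mr) (hnb : b.toNat < nc) :
    ∀ (l : List Int), (∀ w ∈ l, 1 ≤ w ∧ 2 * w ≤ b) → ∀ (g : Nat → Nat → Int) (r1 r2 : Int → Int) (s : Int),
      g a.toNat b.toNat = s →
      (∀ w ∈ l, g a.toNat (b - w).toNat = r1 w) →
      (∀ w ∈ l, g a.toNat w.toNat = r2 w) →
      l.foldl (fun f w => acSet2 f a b (max (acGet2 f a b) (acGet2 f a (b - w) + acGet2 f a w)))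
        (acTab mr nc g)
      = acTab mr nc (fun p q => if p = a.toNat ∧ q = b.toNat
          then l.foldl (fun acc w => max acc (r1 w + r2 w)) s
          else g p q) := by
  intro l
  induction l with
  | nil =>
    intro _ g r1 r2 s hs _ _
    simp only [List.foldl_nil]
    apply acTab_congr
    intro p hp q hq
    split
    · rename_i hpq; rw [hpq.1, hpq.2, hs]
    · rfl
  | cons w t iwt =>
    intro hmem g r1 r2 s hs hr1 hr2
    obtain ⟨hw1, hw2⟩ := hmem w (List.mem_cons_self ..)
    simp only [List.foldl_cons]
    rw [acTab_get g (by omega) hma (by omega) hnb,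
        acTab_get g (by omega) hma (by omega) (by omega),
        acTab_get g (by omega) hma (by omega) (by omega),
        acTab_set g _ (by omega) hma (by omega) hnb,
        iwt (fun x hx => hmem x (List.mem_cons_of_mem _ hx)) _ r1 r2
          (max s (r1 w + r2 w))
          (by
            rw [if_pos ⟨rfl, rfl⟩, hs, hr1 w (List.mem_cons_self ..), hr2 w (List.mem_cons_self ..)])
          (by
            intro x hx
            obtain ⟨hx1, hx2⟩ := hmem x (List.mem_cons_of_mem _ hx)
            rw [if_neg (by intro hc; omega)]
            exact hr1 x (List.mem_cons_of_mem _ hx))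
          (by
            intro x hx
            obtain ⟨hx1, hx2⟩ := hmem x (List.mem_cons_of_mem _ hx)
            rw [if_neg (by intro hc; omega)]
            exact hr2 x (List.mem_cons_of_mem _ hx))]
    apply acTab_congr
    intro p hp q hq
    by_cases hpq : p = a.toNat ∧ q = b.toNat
    · rw [if_pos hpq, if_pos hpq]
    · rw [if_neg hpq, if_neg hpq, if_neg hpq]

-- table contents while cells ≤ (A,B-1) in row-major order are done
def acG (m : List (List Int)) (A B : Nat) : Nat → Nat → Int := fun p q =>
  if p < A ∨ (p = A ∧ q < B) then acFF m (p : Int) (q : Int) else 0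

-- the port's inner loop body, named so the proofs can talk about it (definitionally the lambda in another_cut)
def acBody (m : List (List Int)) (a b : Int) (func : List (List Int)) : List (List Int) :=
  match (PySem.List.pyGet? m a).bind (fun r => PySem.List.pyGet? r b) with
  | none => func
  | some v =>
    let func := acSet2 func a b v
    let func := (PySem.List.pyRange 1 (PySem.Int.floordiv a 2 + 1) 1).foldl
      (fun f h => acSet2 f a b (max (acGet2 f a b) (acGet2 f (a - h) b + acGet2 f h b))) func
    (PySem.List.pyRange 1 (PySem.Int.floordiv b 2 + 1) 1).foldl
      (fun f w => acSet2 f a b (max (acGet2 f a b) (acGet2 f a (b - w) + acGet2 f a w))) func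

theorem acCell (m : List (List Int)) {mr nc : Nat} {a b : Int} (ha : 1 ≤ a) (hb : 1 ≤ b)
    (hma : a.toNat < mr) (hnb : b.toNat < nc) :
    acBody m a b (acTab mr nc (acG m a.toNat b.toNat))
      = acTab mr nc (acG m a.toNat (b.toNat + 1)) := by
  have hca : ((a.toNat : Int)) = a := Int.toNat_of_nonneg (by omega)
  have hcb : ((b.toNat : Int)) = b := Int.toNat_of_nonneg (by omega)
  unfold acBody
  cases hm : (PySem.List.pyGet? m a).bind (fun r => PySem.List.pyGet? r b) with
  | none =>
    apply acTab_congr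
    intro p hp q hq
    unfold acG
    split_ifs with h1 h2
    · rfl
    · omega
    · have hpA : p = a.toNat := by omega
      have hqB : q = b.toNat := by omega
      subst hpA; subst hqB
      rw [hca, hcb, acFF_unfold m a b (by omega) (by omega), if_neg (by omega), hm]
    · rfl
  | some v0 =>
    dsimp only
    rw [acTab_set (acG m a.toNat b.toNat) v0 (by omega) hma (by omega) hnb]
    rw [acTab_hfold ha hb hma hnb _ (fun h hh => acMemH hh) _
        (fun h => acFF m (a - h) b) (fun h => acFF m h b) v0
        (by rw [if_pos ⟨rfl, rfl⟩])
        (by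
          intro x hx
          obtain ⟨hx1, hx2⟩ := acMemH hx
          rw [if_neg (by intro hc; omega)]
          unfold acG
          rw [if_pos (by omega), Int.toNat_of_nonneg (by omega : (0:Int) ≤ a - x), hcb])
        (by
          intro x hx
          obtain ⟨hx1, hx2⟩ := acMemH hx
          rw [if_neg (by intro hc; omega)]
          unfold acG
          rw [if_pos (by omega), Int.toNat_of_nonneg (by omega : (0:Int) ≤ x), hcb])]
    rw [acTab_wfold ha hb hma hnb _ (fun w hw => acMemH hw) _
        (fun w => acFF m a (b - w)) (fun w => acFF m a w)
        ((PySem.List.pyRange 1 (PySem.Int.floordiv a 2 + 1) 1).foldl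
          (fun acc h => max acc (acFF m (a - h) b + acFF m h b)) v0)
        (by rw [if_pos ⟨rfl, rfl⟩])
        (by
          intro x hx
          obtain ⟨hx1, hx2⟩ := acMemH hx
          rw [if_neg (by intro hc; omega), if_neg (by intro hc; omega)]
          unfold acG
          rw [if_pos (by omega), Int.toNat_of_nonneg (by omega : (0:Int) ≤ b - x), hca])
        (by
          intro x hx
          obtain ⟨hx1, hx2⟩ := acMemH hx
          rw [if_neg (by intro hc; omega), if_neg (by intro hc; omega)]
          unfold acG
          rw [if_pos (by omega), Int.toNat_of_nonneg (by omega : (0:Int) ≤ x), hca])]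
    apply acTab_congr
    intro p hp q hq
    by_cases hpq : p = a.toNat ∧ q = b.toNat
    · obtain ⟨hp1, hq1⟩ := hpq
      subst hp1; subst hq1
      rw [if_pos ⟨rfl, rfl⟩]
      unfold acG
      rw [if_pos (by omega), hca, hcb,
          acFF_unfold m a b (by omega) (by omega), if_neg (by omega), hm]
    · rw [if_neg hpq, if_neg hpq, if_neg hpq]
      unfold acG
      by_cases hfin : p < a.toNat ∨ (p = a.toNat ∧ q < b.toNat)
      · rw [if_pos hfin, if_pos (by omega)]
      · rw [if_neg hfin, if_neg (by omega)]

-- processing one full row advances the row-major frontier by one row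
theorem acRow (m : List (List Int)) {mr nc : Nat} {a : Int} (ha : 1 ≤ a) (hma : a.toNat < mr)
    (y : Int) (hy : 0 ≤ y) (hnc : nc = y.toNat + 1) :
    ∀ (t : Nat), t ≤ y.toNat →
      (PySem.List.pyRange 1 ((t : Int) + 1) 1).foldl (fun func b => acBody m a b func)
        (acTab mr nc (acG m a.toNat 1))
      = acTab mr nc (acG m a.toNat (t + 1)) := by
  intro t
  induction t with
  | zero =>
    intro _
    rw [show ((0 : Nat) : Int) + 1 = 1 by norm_num,
        PySem.List.pyRange_one_eq_nil (le_refl (1 : Int))]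
    simp
  | succ t iht =>
    intro ht
    have : ((t + 1 : Nat) : Int) + 1 = ((t : Int) + 1) + 1 := by push_cast; ring
    rw [this, PySem.List.pyRange_one_succ_right (a := 1) (b := (t : Int) + 1) (by omega), List.foldl_append,
        iht (by omega), List.foldl_cons, List.foldl_nil]
    have hb1 : (1 : Int) ≤ (t : Int) + 1 := by omega
    have := acCell m (a := a) (b := (t : Int) + 1) ha hb1 hma
      (nc := nc) (by omega)
    rw [show ((t : Int) + 1).toNat = t + 1 by omega] at this
    exact this

-- processing rows 1..t leaves the first t rows done
theorem acOuter (m : List (List Int)) {mr nc : Nat} (x y : Int) (hx : 0 ≤ x) (hy : 0 ≤ y)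
    (hmr : mr = x.toNat + 1) (hnc : nc = y.toNat + 1) :
    ∀ (t : Nat), t ≤ x.toNat →
      (PySem.List.pyRange 1 ((t : Int) + 1) 1).foldl
        (fun func a => (PySem.List.pyRange 1 (y + 1) 1).foldl (fun func b => acBody m a b func) func)
        (acTab mr nc (acG m 1 1))
      = acTab mr nc (acG m (t + 1) 1) := by
  intro t
  induction t with
  | zero =>
    intro _
    rw [show ((0 : Nat) : Int) + 1 = 1 by norm_num,
        PySem.List.pyRange_one_eq_nil (le_refl (1 : Int))]
    simp
  | succ t iht =>
    intro ht
    have hcast : ((t + 1 : Nat) : Int) + 1 = ((t : Int) + 1) + 1 := by push_cast; ring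
    rw [hcast, PySem.List.pyRange_one_succ_right (a := 1) (b := (t : Int) + 1) (by omega), List.foldl_append,
        iht (by omega), List.foldl_cons, List.foldl_nil]
    -- this row starts from frontier (t+1, 1); run the row lemma with a = t+1
    have ha1 : (1 : Int) ≤ (t : Int) + 1 := by omega
    have hma : ((t : Int) + 1).toNat < mr := by omega
    have hrow := acRow m (a := (t : Int) + 1) ha1 hma y hy hnc y.toNat le_rfl
    rw [show ((t : Int) + 1).toNat = t + 1 by omega] at hrow
    rw [show y + 1 = ((y.toNat : Nat) : Int) + 1 by omega]
    rw [hrow]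
    -- end of row t+1 = start of row t+2
    apply acTab_congr
    intro p hp q hq
    unfold acG
    by_cases h1 : p < t + 1 ∨ (p = t + 1 ∧ q < y.toNat + 1)
    · rw [if_pos h1, if_pos (by omega)]
    · by_cases h2 : p < t + 2 ∨ (p = t + 2 ∧ q < 1)
      · -- p = t+1, q ≥ y.toNat+1 impossible (q < nc); so p = t+2, q = 0: both sides are 0
        rw [if_pos h2]
        have hp2 : p = t + 2 ∧ q = 0 := by omega
        rw [hp2.1, hp2.2]
        rw [show ((0 : Nat) : Int) = (0 : Int) by norm_num, acFF_zero_right]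
        simp
      · rw [if_neg h2, if_neg (by omega)]

-- the initial table is all zeros
theorem acInit (x y : Int) :
    ((PySem.List.pyRange 0 (x + 1) 1).map (fun _ => (PySem.List.pyRange 0 (y + 1) 1).map (fun _ => (0 : Int))))
      = acTab (x + 1).toNat (y + 1).toNat (fun _ _ => 0) := by
  unfold acTab
  rw [PySem.List.pyRange_one, PySem.List.pyRange_one]
  simp [List.map_map, Function.comp_def]

theorem a_eq_acFF (m : List (List Int)) (x y : Int) (hx : 0 ≤ x) (hy : 0 ≤ y) :
    another_cut m x y = acFF m x y := by
  have hmr : (x + 1).toNat = x.toNat + 1 := by omega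
  have hnc : (y + 1).toNat = y.toNat + 1 := by omega
  have hbody : another_cut m x y = acGet2
      ((PySem.List.pyRange 1 (x + 1) 1).foldl
        (fun func a => (PySem.List.pyRange 1 (y + 1) 1).foldl (fun func b => acBody m a b func) func)
        ((PySem.List.pyRange 0 (x + 1) 1).map (fun _ => (PySem.List.pyRange 0 (y + 1) 1).map (fun _ => (0 : Int)))))
      x y := rfl
  rw [hbody, acInit, hmr, hnc]
  have hzero : acTab (x.toNat + 1) (y.toNat + 1) (fun _ _ => 0)
      = acTab (x.toNat + 1) (y.toNat + 1) (acG m 1 1) := by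
    apply acTab_congr
    intro p hp q hq
    unfold acG
    by_cases h1 : p < 1 ∨ (p = 1 ∧ q < 1)
    · rw [if_pos h1]
      rcases h1 with h1 | h1
      · rw [show p = 0 by omega, show ((0 : Nat) : Int) = (0 : Int) by norm_num, acFF_zero_left]
      · rw [h1.1, show q = 0 by omega, show ((0 : Nat) : Int) = (0 : Int) by norm_num, acFF_zero_right]
    · rw [if_neg h1]
  rw [hzero]
  have houter := acOuter m x y hx hy rfl rfl x.toNat le_rfl
  rw [show (x.toNat : Int) + 1 = x + 1 by omega] at houter
  rw [houter]
  rw [acTab_get _ hx (by omega) hy (by omega)]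
  unfold acG
  rw [if_pos (by omega), Int.toNat_of_nonneg hx, Int.toNat_of_nonneg hy]

-- ===== VERDICT (by name: the statement is the Claim_ definition above) =====
theorem another_cut_spec : Claim_equal_another_cut := by
  intro m x y _ hpre
  unfold Spec_another_cut
  rw [a_eq_acFF m x y hpre.1 hpre.2, alt_eq_acFF m x y hpre.1 hpre.2]
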